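-- pv_equiv track=rewrite | github.com/esddse/NER | structured_perceptron.py | generate_edge_features_update
-- ===== SOURCE A (Python) =====
-- def generate_edge_features_update(Y):
-- 	for i in range(1, len(Y)):
-- 		pred2 = Y[i-2] if i-2 >= 0 else 'start'
-- 		pred1 = Y[i-1]
-- 		current = Y[i]
-- 		feature_vector = [
-- 					  'pred2+current'+pred2+current,
-- 					  'pred1+current'+pred1+current,
-- 					  #'pred2+pred1+current'+pred2+pred1+current,
-- 					  ]
-- 		yield feature_vector
-- ===== SOURCE B (Python) =====
-- def generate_edge_features_update(Y):
--     def walk(pred2, pred1, rest):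
--         if rest:
--             current = rest[0]
--             yield ['pred2+current' + pred2 + current,
--                    'pred1+current' + pred1 + current]
--             yield from walk(pred1, current, rest[1:])
--     if Y:
--         yield from walk('start', Y[0], Y[1:])
-- ===== Notes on version B (the rewrite author's own statement) =====
-- stated objective: alternative
-- what changed: Replaces the index loop with its boundary conditional by a structural recursion over the tail of Y that carries the last two labels (pred2, pred1) as explicit state, so no indexing or 'start' branch occurs inside the traversal.
import Mathlib
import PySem

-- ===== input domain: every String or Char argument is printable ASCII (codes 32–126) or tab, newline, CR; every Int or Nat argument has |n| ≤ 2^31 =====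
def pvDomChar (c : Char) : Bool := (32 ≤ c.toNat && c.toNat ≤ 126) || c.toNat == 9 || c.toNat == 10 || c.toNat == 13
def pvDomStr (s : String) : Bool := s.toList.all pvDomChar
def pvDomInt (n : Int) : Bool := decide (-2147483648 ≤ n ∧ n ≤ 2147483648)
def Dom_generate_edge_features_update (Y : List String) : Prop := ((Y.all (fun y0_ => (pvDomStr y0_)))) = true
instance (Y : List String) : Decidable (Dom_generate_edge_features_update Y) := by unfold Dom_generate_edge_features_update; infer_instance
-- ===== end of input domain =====

-- B replaces A's index loop (with its `if i-2>=0 else 'start'` branch) by a structural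
-- recursion over Y's tail carrying the last two labels as state; same outputs (return
-- value only: A is a generator, both ports return the list of yielded feature vectors).

-- ===== PORT A =====
-- for i in range(1, len(Y)): Y[i-2] (guarded by i-2>=0, so always in range), Y[i-1], Y[i]
def generate_edge_features_update (Y : List String) : List (List String) :=
  (PySem.List.pyRange 1 (Y.length : Int) 1).map (fun i =>
    let pred2 := if i - 2 ≥ 0 then PySem.List.pyGetD Y (i - 2) "" else "start"
    let pred1 := PySem.List.pyGetD Y (i - 1) ""
    let current := PySem.List.pyGetD Y i ""
    ["pred2+current" ++ pred2 ++ current, "pred1+current" ++ pred1 ++ current])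

-- ===== PORT B =====
-- def walk(pred2, pred1, rest): if rest: yield feature vector; yield from walk(pred1, rest[0], rest[1:])
def pvWalk (pred2 pred1 : String) : List String → List (List String)
  | [] => []
  | current :: rest =>
      ["pred2+current" ++ pred2 ++ current, "pred1+current" ++ pred1 ++ current]
        :: pvWalk pred1 current rest

-- if Y: yield from walk('start', Y[0], Y[1:])
def generate_edge_features_update_alt (Y : List String) : List (List String) :=
  match Y with
  | [] => []
  | y0 :: ys => pvWalk "start" y0 ys

-- ===== PRECONDITION & SPEC =====
def Spec_generate_edge_features_update (Y : List String) (out : List (List String)) : Prop := out = generate_edge_features_update_alt Y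
instance (Y : List String) (out : List (List String)) : Decidable (Spec_generate_edge_features_update Y out) := by unfold Spec_generate_edge_features_update; infer_instance

-- ===== CLAIM =====
def Claim_equal_generate_edge_features_update : Prop := ∀ (Y : List String), Dom_generate_edge_features_update Y → Spec_generate_edge_features_update Y (generate_edge_features_update Y)

-- ===== LEMMAS AND PROOFS =====

-- a map computing three indexed values is a three-way zip of the component maps
theorem pv_map_eq_zipWith3 {α β₁ β₂ β₃ γ : Type} (f : β₁ → β₂ → β₃ → γ)
    (g : α → β₁) (h : α → β₂) (k : α → β₃) (l : List α) :
    l.map (fun x => f (g x) (h x) (k x)) = List.zipWith3 f (l.map g) (l.map h) (l.map k) := by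
  induction l with
  | nil => rfl
  | cons a t ih => simp [List.zipWith3, ih]

-- zipWith3 only looks at the first l3.length entries of the first two lists
theorem pv_zipWith3_take {α β γ δ : Type} (f : α → β → γ → δ) :
    ∀ (l3 : List γ) (l1 : List α) (l2 : List β),
      List.zipWith3 f (l1.take l3.length) (l2.take l3.length) l3 = List.zipWith3 f l1 l2 l3 := by
  intro l3
  induction l3 with
  | nil => intro l1 l2; simp [List.zipWith3]
  | cons c cs ih =>
    intro l1 l2
    cases l1 with
    | nil => simp [List.zipWith3]
    | cons a as =>
      cases l2 with
      | nil => simp [List.zipWith3]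
      | cons b bs => simp [List.zipWith3, ih]

theorem pv_map_current (Y : List String) :
    (PySem.List.pyRange 1 (Y.length : Int) 1).map (fun i => PySem.List.pyGetD Y i "") = Y.drop 1 :=
  PySem.List.map_pyGetD_pyRange' Y "" (a := 1) (by omega)

theorem pv_map_pred1 (Y : List String) :
    (PySem.List.pyRange 1 (Y.length : Int) 1).map (fun i => PySem.List.pyGetD Y (i - 1) "") =
      Y.take (Y.length - 1) := by
  apply List.ext_getElem
  · simp [PySem.List.length_pyRange_one]
  · intro k hk _
    have hk' : k < (((Y.length : Int) - 1)).toNat := by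
      simpa [PySem.List.length_pyRange_one] using hk
    have hkY : k < Y.length := by omega
    rw [List.getElem_map, PySem.List.getElem_pyRange_one]
    have : (1 : Int) + k - 1 = (k : Int) := by omega
    rw [this, PySem.List.pyGetD_natCast, List.getElem_take]
    exact List.getD_eq_getElem Y "" hkY

theorem pv_map_pred2 (Y : List String) :
    (PySem.List.pyRange 1 (Y.length : Int) 1).map
        (fun i => if i - 2 ≥ 0 then PySem.List.pyGetD Y (i - 2) "" else "start") =
      ("start" :: Y).take (Y.length - 1) := by
  apply List.ext_getElem
  · simp [PySem.List.length_pyRange_one]; omega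
  · intro k hk _
    have hk' : k < (((Y.length : Int) - 1)).toNat := by
      simpa [PySem.List.length_pyRange_one] using hk
    rw [List.getElem_map, PySem.List.getElem_pyRange_one, List.getElem_take]
    cases k with
    | zero => simp
    | succ m =>
      have hm : m < Y.length := by omega
      have h2 : ((1 : Int) + (m + 1 : Nat)) - 2 = (m : Int) := by push_cast; omega
      have hge : ((1 : Int) + (m + 1 : Nat)) - 2 ≥ 0 := by push_cast; omega
      rw [if_pos hge, h2, PySem.List.pyGetD_natCast]
      simpa using List.getD_eq_getElem Y "" hm

-- B's recursion with carried state is a three-way zip over staggered lists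
theorem pv_walk_eq_zipWith3 :
    ∀ (rest : List String) (p2 p1 : String),
      pvWalk p2 p1 rest =
        List.zipWith3 (fun pred2 pred1 current =>
            ["pred2+current" ++ pred2 ++ current, "pred1+current" ++ pred1 ++ current])
          (p2 :: p1 :: rest) (p1 :: rest) rest := by
  intro rest
  induction rest with
  | nil => intro p2 p1; rfl
  | cons c cs ih => intro p2 p1; simp [pvWalk, List.zipWith3, ih]

theorem pv_A_eq_B (Y : List String) :
    generate_edge_features_update Y = generate_edge_features_update_alt Y := by
  unfold generate_edge_features_update
  rw [pv_map_eq_zipWith3 (fun pred2 pred1 current =>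
        ["pred2+current" ++ pred2 ++ current, "pred1+current" ++ pred1 ++ current])]
  rw [pv_map_current, pv_map_pred1, pv_map_pred2]
  cases Y with
  | nil => rfl
  | cons y0 ys =>
    show _ = pvWalk "start" y0 ys
    rw [pv_walk_eq_zipWith3]
    have hlen : (y0 :: ys).length - 1 = ys.length := by simp
    have h1 : ("start" :: y0 :: ys).take ((y0 :: ys).length - 1) =
        ("start" :: y0 :: ys).take ys.length := by rw [hlen]
    have h2 : (y0 :: ys).take ((y0 :: ys).length - 1) =
        (y0 :: ys).take ys.length := by rw [hlen]
    rw [h1, h2]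
    have hd : (y0 :: ys).drop 1 = ys := rfl
    rw [hd, pv_zipWith3_take]

-- ===== VERDICT =====
theorem generate_edge_features_update_spec : Claim_equal_generate_edge_features_update := by
  intro Y _
  exact pv_A_eq_B Y
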